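-- pv_equiv track=rewrite | github.com/riiiiiicoooo/infrastructure-automation-platform | src/incident_response/alert_correlator.py | _are_connected
-- ===== SOURCE A (Python) =====
-- def _are_connected(
--     resource_a: str, resource_b: str, adjacency: dict, max_hops: int = 3
-- ) -> bool:
--     """BFS to check if two resources are connected within max_hops."""
--     if resource_a == resource_b:
--         return True
--
--     visited = {resource_a}
--     frontier = {resource_a}
--
--     for _ in range(max_hops):
--         next_frontier = set()
--         for node in frontier:
--             neighbors = adjacency.get(node, set())
--             for neighbor in neighbors:
--                 if neighbor == resource_b:
--                     return True
--                 if neighbor not in visited: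
--                     visited.add(neighbor)
--                     next_frontier.add(neighbor)
--         frontier = next_frontier
--
--     return False
-- ===== SOURCE B (Python) =====
-- def _are_connected(
--     resource_a: str, resource_b: str, adjacency: dict, max_hops: int = 3
-- ) -> bool:
--     """Monotone closure iteration: repeatedly expand the whole reached set and
--     test the target once per round (no visited/frontier pair, no inner early exit)."""
--     if resource_a == resource_b:
--         return True
--
--     reached = {resource_a}
--     for _ in range(max_hops):
--         expanded = set(reached)
--         for node in reached:
--             expanded.update(adjacency.get(node, ()))
--         if resource_b in expanded:
--             return True
--         reached = expanded
--     return False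
-- ===== Notes on version B (the rewrite author's own statement) =====
-- stated objective: simpler
-- what changed: Replaces the visited/frontier BFS with per-neighbor early return by a monotone closure iteration: each round re-expands the whole reached set in one pass and tests the target by a single membership check, maintaining one set instead of two.
import Mathlib
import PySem

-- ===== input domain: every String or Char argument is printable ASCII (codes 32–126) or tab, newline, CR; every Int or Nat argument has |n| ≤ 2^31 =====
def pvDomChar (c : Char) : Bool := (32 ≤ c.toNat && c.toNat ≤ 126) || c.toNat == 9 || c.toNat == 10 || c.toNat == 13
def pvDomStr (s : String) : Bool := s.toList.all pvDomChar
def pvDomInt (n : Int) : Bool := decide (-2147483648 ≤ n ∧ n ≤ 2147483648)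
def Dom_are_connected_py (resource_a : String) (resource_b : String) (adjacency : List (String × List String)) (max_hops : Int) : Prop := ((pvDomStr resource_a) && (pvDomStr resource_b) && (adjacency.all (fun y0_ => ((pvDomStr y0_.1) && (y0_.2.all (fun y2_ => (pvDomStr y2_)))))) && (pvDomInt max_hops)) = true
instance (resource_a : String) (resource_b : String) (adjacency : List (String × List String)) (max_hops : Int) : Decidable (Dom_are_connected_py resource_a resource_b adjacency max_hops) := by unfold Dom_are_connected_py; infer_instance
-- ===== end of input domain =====

-- B replaces A's visited/frontier BFS by a one-set monotone closure iteration (simpler state, same boolean result).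

-- ===== PORT A =====
-- adjacency.get(node, set())  (values are lists; first-match dict lookup)
def pvAdjA (adjacency : List (String × List String)) (node : String) : List String :=
  ((PySem.Dict.mk adjacency).get? node).getD []

-- inner 'for neighbor in neighbors' loop; none = the Python 'return True' fired
def pvAProcA (resource_b : String) (neighbors : List String)
    (visited next_frontier : PySem.Set String) :
    Option (PySem.Set String × PySem.Set String) :=
  match neighbors with
  | [] => some (visited, next_frontier)
  | n :: rest =>
    if n == resource_b then none
    else if PySem.Set.contains visited n then pvAProcA resource_b rest visited next_frontier
    else pvAProcA resource_b rest (PySem.Set.add visited n) (PySem.Set.add next_frontier n)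

-- middle 'for node in frontier' loop
def pvAFrontierA (resource_b : String) (adjacency : List (String × List String))
    (nodes : List String) (visited next_frontier : PySem.Set String) :
    Option (PySem.Set String × PySem.Set String) :=
  match nodes with
  | [] => some (visited, next_frontier)
  | node :: rest =>
    match pvAProcA resource_b (pvAdjA adjacency node) visited next_frontier with
    | none => none
    | some (v, nf) => pvAFrontierA resource_b adjacency rest v nf

-- outer 'for _ in range(max_hops)' loop
def pvARoundsA (resource_b : String) (adjacency : List (String × List String)) :
    Nat → PySem.Set String → PySem.Set String → Bool
  | 0, _, _ => false
  | k + 1, visited, frontier =>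
    match pvAFrontierA resource_b adjacency frontier visited PySem.Set.empty with
    | none => true
    | some (v, nf) => pvARoundsA resource_b adjacency k v nf

def are_connected_py (resource_a : String) (resource_b : String) (adjacency : List (String × List String)) (max_hops : Int) : Bool :=
  if resource_a == resource_b then true
  else pvARoundsA resource_b adjacency max_hops.toNat
    (PySem.Set.ofList [resource_a]) (PySem.Set.ofList [resource_a])

-- ===== PORT B =====
-- adjacency.get(node, ())
def pvAdjB (adjacency : List (String × List String)) (node : String) : List String :=
  ((PySem.Dict.mk adjacency).get? node).getD []

-- 'for _ in range(max_hops)' loop of Source B: one reached set, expanded wholesale each round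
def pvBLoopB (resource_b : String) (adjacency : List (String × List String)) :
    Nat → PySem.Set String → Bool
  | 0, _ => false
  | k + 1, reached =>
    let expanded := reached.foldl
      (fun acc node => PySem.Set.update acc (pvAdjB adjacency node))
      (PySem.Set.ofList reached)
    if PySem.Set.contains expanded resource_b then true
    else pvBLoopB resource_b adjacency k expanded

def are_connected_py_alt (resource_a : String) (resource_b : String) (adjacency : List (String × List String)) (max_hops : Int) : Bool :=
  if resource_a == resource_b then true
  else pvBLoopB resource_b adjacency max_hops.toNat (PySem.Set.ofList [resource_a])

-- ===== PRECONDITION & SPEC =====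
def Spec_are_connected_py (resource_a : String) (resource_b : String) (adjacency : List (String × List String)) (max_hops : Int) (out : Bool) : Prop := out = are_connected_py_alt resource_a resource_b adjacency max_hops
instance (resource_a : String) (resource_b : String) (adjacency : List (String × List String)) (max_hops : Int) (out : Bool) : Decidable (Spec_are_connected_py resource_a resource_b adjacency max_hops out) := by unfold Spec_are_connected_py; infer_instance

-- ===== CLAIM (what is proved, stated in full; the proofs are below) =====
def Claim_equal_are_connected_py : Prop := ∀ (resource_a : String) (resource_b : String) (adjacency : List (String × List String)) (max_hops : Int), Dom_are_connected_py resource_a resource_b adjacency max_hops → Spec_are_connected_py resource_a resource_b adjacency max_hops (are_connected_py resource_a resource_b adjacency max_hops)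

-- ===== LEMMAS AND PROOFS =====

lemma procA_none_iff (b : String) : ∀ (ns : List String) (v nx : PySem.Set String),
    pvAProcA b ns v nx = none ↔ b ∈ ns := by
  intro ns
  induction ns with
  | nil => intro v nx; simp [pvAProcA]
  | cons n rest ih =>
    intro v nx
    by_cases hb : n = b
    · simp [pvAProcA, hb]
    · by_cases hv : n ∈ v
      · simp [pvAProcA, beq_iff_eq, hb, Ne.symm hb, hv, ih]
      · simp [pvAProcA, beq_iff_eq, hb, Ne.symm hb, hv, ih]

lemma procA_some (b : String) : ∀ (ns : List String) (v nx v' nx' : PySem.Set String),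
    pvAProcA b ns v nx = some (v', nx') →
    ∀ x, (x ∈ v' ↔ x ∈ v ∨ x ∈ ns) ∧ (x ∈ nx' ↔ x ∈ nx ∨ (x ∈ ns ∧ x ∉ v)) := by
  intro ns
  induction ns with
  | nil =>
    intro v nx v' nx' h x
    simp [pvAProcA] at h
    simp [h.1, h.2]
  | cons n rest ih =>
    intro v nx v' nx' h x
    simp only [pvAProcA] at h
    by_cases hb : n = b
    · rw [if_pos (by simp [hb])] at h
      exact absurd h (by simp)
    · rw [if_neg (by simp [hb])] at h
      by_cases hv : n ∈ v
      · rw [if_pos ((PySem.Set.contains_iff v n).mpr hv)] at h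
        have := ih v nx v' nx' h x
        constructor
        · rw [this.1]
          constructor
          · rintro (h1 | h1)
            · exact Or.inl h1
            · exact Or.inr (List.mem_cons_of_mem _ h1)
          · rintro (h1 | h1)
            · exact Or.inl h1
            · rcases List.mem_cons.mp h1 with h2 | h2
              · exact Or.inl (h2 ▸ hv)
              · exact Or.inr h2
        · rw [this.2]
          constructor
          · rintro (h1 | h1)
            · exact Or.inl h1
            · exact Or.inr ⟨List.mem_cons_of_mem _ h1.1, h1.2⟩
          · rintro (h1 | ⟨h1, h2⟩)
            · exact Or.inl h1
            · rcases List.mem_cons.mp h1 with h3 | h3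
              · exact absurd (h3 ▸ hv) h2
              · exact Or.inr ⟨h3, h2⟩
      · rw [if_neg (fun hc => hv ((PySem.Set.contains_iff v n).mp hc))] at h
        have := ih (PySem.Set.add v n) (PySem.Set.add nx n) v' nx' h x
        rw [PySem.Set.mem_add, PySem.Set.mem_add] at this
        constructor
        · rw [this.1]; simp only [List.mem_cons]; tauto
        · rw [this.2]; simp only [List.mem_cons]
          by_cases hx : x = n
          · subst hx; tauto
          · tauto

lemma frontA_none_iff (b : String) (adj : List (String × List String)) :
    ∀ (nodes : List String) (v nx : PySem.Set String),
    pvAFrontierA b adj nodes v nx = none ↔ ∃ n ∈ nodes, b ∈ pvAdjA adj n := by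
  intro nodes
  induction nodes with
  | nil => intro v nx; simp [pvAFrontierA]
  | cons node rest ih =>
    intro v nx
    simp only [pvAFrontierA]
    cases hp : pvAProcA b (pvAdjA adj node) v nx with
    | none =>
      have := (procA_none_iff b (pvAdjA adj node) v nx).mp hp
      simp only [List.mem_cons]
      constructor
      · intro _; exact ⟨node, Or.inl rfl, this⟩
      · intro _; trivial
    | some p =>
      cases p with
      | mk v1 nx1 =>
        have hnb : b ∉ pvAdjA adj node := by
          intro hc
          rw [(procA_none_iff b (pvAdjA adj node) v nx).mpr hc] at hp
          simp at hp
        rw [ih]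
        constructor
        · rintro ⟨n, hn, hbn⟩; exact ⟨n, List.mem_cons_of_mem _ hn, hbn⟩
        · rintro ⟨n, hn, hbn⟩
          rcases List.mem_cons.mp hn with h1 | h1
          · exact absurd (h1 ▸ hbn) hnb
          · exact ⟨n, h1, hbn⟩

lemma frontA_some (b : String) (adj : List (String × List String)) :
    ∀ (nodes : List String) (v nx v' nf : PySem.Set String),
    pvAFrontierA b adj nodes v nx = some (v', nf) →
    ∀ x, (x ∈ v' ↔ x ∈ v ∨ ∃ n ∈ nodes, x ∈ pvAdjA adj n) ∧
         (x ∈ nf ↔ x ∈ nx ∨ ((∃ n ∈ nodes, x ∈ pvAdjA adj n) ∧ x ∉ v)) := by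
  intro nodes
  induction nodes with
  | nil =>
    intro v nx v' nf h x
    simp [pvAFrontierA] at h
    simp [h.1, h.2]
  | cons node rest ih =>
    intro v nx v' nf h x
    simp only [pvAFrontierA] at h
    cases hp : pvAProcA b (pvAdjA adj node) v nx with
    | none => rw [hp] at h; simp at h
    | some p =>
      cases p with
      | mk v1 nx1 =>
        rw [hp] at h
        simp only at h
        have h1 := procA_some b (pvAdjA adj node) v nx v1 nx1 hp x
        have h2 := ih v1 nx1 v' nf h x
        constructor
        · rw [h2.1, h1.1]
          constructor
          · rintro ((ha | ha) | ⟨n, hn, hxn⟩)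
            · exact Or.inl ha
            · exact Or.inr ⟨node, List.mem_cons_self, ha⟩
            · exact Or.inr ⟨n, List.mem_cons_of_mem _ hn, hxn⟩
          · rintro (ha | ⟨n, hn, hxn⟩)
            · exact Or.inl (Or.inl ha)
            · rcases List.mem_cons.mp hn with hh | hh
              · exact Or.inl (Or.inr (hh ▸ hxn))
              · exact Or.inr ⟨n, hh, hxn⟩
        · rw [h2.2, h1.2, h1.1]
          constructor
          · rintro ((ha | ha) | ⟨⟨n, hn, hxn⟩, hnv⟩)
            · exact Or.inl ha
            · exact Or.inr ⟨⟨node, List.mem_cons_self, ha.1⟩, ha.2⟩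
            · exact Or.inr ⟨⟨n, List.mem_cons_of_mem _ hn, hxn⟩,
                fun hc => hnv (Or.inl hc)⟩
          · rintro (ha | ⟨⟨n, hn, hxn⟩, hnv⟩)
            · exact Or.inl (Or.inl ha)
            · rcases List.mem_cons.mp hn with hh | hh
              · exact Or.inl (Or.inr ⟨hh ▸ hxn, hnv⟩)
              · by_cases hnode : x ∈ pvAdjA adj node
                · exact Or.inl (Or.inr ⟨hnode, hnv⟩)
                · exact Or.inr ⟨⟨n, hh, hxn⟩, fun hc => by
                    rcases hc with hc | hc
                    · exact hnv hc
                    · exact hnode hc⟩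

lemma mem_foldl_updateB (adj : List (String × List String)) :
    ∀ (nodes : List String) (acc : PySem.Set String) (x : String),
    (x ∈ nodes.foldl (fun a n => PySem.Set.update a (pvAdjB adj n)) acc) ↔
      x ∈ acc ∨ ∃ n ∈ nodes, x ∈ pvAdjA adj n := by
  intro nodes
  induction nodes with
  | nil => intro acc x; simp
  | cons node rest ih =>
    intro acc x
    rw [List.foldl_cons, ih, PySem.Set.mem_update]
    constructor
    · rintro ((h | h) | ⟨n, hn, hxn⟩)
      · exact Or.inl h
      · exact Or.inr ⟨node, List.mem_cons_self, h⟩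
      · exact Or.inr ⟨n, List.mem_cons_of_mem _ hn, hxn⟩
    · rintro (h | ⟨n, hn, hxn⟩)
      · exact Or.inl (Or.inl h)
      · rcases List.mem_cons.mp hn with hh | hh
        · exact Or.inl (Or.inr (hh ▸ hxn))
        · exact Or.inr ⟨n, hh, hxn⟩

lemma rounds_eq (b : String) (adj : List (String × List String)) :
    ∀ (k : Nat) (v f r : PySem.Set String),
    (∀ x, x ∈ r ↔ x ∈ v) →
    (∀ x, x ∈ f → x ∈ v) →
    (∀ x y, x ∈ v → x ∉ f → y ∈ pvAdjA adj x → y ∈ v) →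
    b ∉ v →
    pvARoundsA b adj k v f = pvBLoopB b adj k r := by
  intro k
  induction k with
  | zero => intro v f r _ _ _ _; rfl
  | succ k ih =>
    intro v f r hr hf hcl hb
    simp only [pvARoundsA, pvBLoopB]
    have hexp : ∀ x, x ∈ r.foldl (fun a n => PySem.Set.update a (pvAdjB adj n))
        (PySem.Set.ofList r) ↔ x ∈ v ∨ ∃ n ∈ v, x ∈ pvAdjA adj n := by
      intro x
      rw [mem_foldl_updateB, PySem.Set.mem_ofList, hr]
      constructor
      · rintro (h | ⟨n, hn, hxn⟩)
        · exact Or.inl h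
        · exact Or.inr ⟨n, (hr n).mp hn, hxn⟩
      · rintro (h | ⟨n, hn, hxn⟩)
        · exact Or.inl h
        · exact Or.inr ⟨n, (hr n).mpr hn, hxn⟩
    have hfound : (∃ n ∈ f, b ∈ pvAdjA adj n) ↔
        b ∈ r.foldl (fun a n => PySem.Set.update a (pvAdjB adj n)) (PySem.Set.ofList r) := by
      rw [hexp]
      constructor
      · rintro ⟨n, hn, hbn⟩; exact Or.inr ⟨n, hf n hn, hbn⟩
      · rintro (h | ⟨n, hn, hbn⟩)
        · exact absurd h hb
        · by_cases hnf : n ∈ f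
          · exact ⟨n, hnf, hbn⟩
          · exact absurd (hcl n b hn hnf hbn) hb
    cases hfr : pvAFrontierA b adj f v PySem.Set.empty with
    | none =>
      have hbm : b ∈ r.foldl (fun a n => PySem.Set.update a (pvAdjB adj n))
          (PySem.Set.ofList r) :=
        hfound.mp ((frontA_none_iff b adj f v PySem.Set.empty).mp hfr)
      simp [hbm]
    | some p =>
      cases p with
      | mk v' nf =>
        have hnex : ¬ ∃ n ∈ f, b ∈ pvAdjA adj n := by
          intro hc
          rw [(frontA_none_iff b adj f v PySem.Set.empty).mpr hc] at hfr
          simp at hfr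
        have hbm : b ∉ r.foldl (fun a n => PySem.Set.update a (pvAdjB adj n))
            (PySem.Set.ofList r) := fun hc => hnex (hfound.mpr hc)
        rw [if_neg (fun hc => hbm ((PySem.Set.contains_iff _ _).mp hc))]
        have hch := frontA_some b adj f v PySem.Set.empty v' nf hfr
        have hv' : ∀ x, x ∈ v' ↔ x ∈ v ∨ ∃ n ∈ f, x ∈ pvAdjA adj n := fun x => (hch x).1
        have hnf' : ∀ x, x ∈ nf ↔ (∃ n ∈ f, x ∈ pvAdjA adj n) ∧ x ∉ v := by
          intro x
          rw [(hch x).2]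
          constructor
          · rintro (h | h)
            · exact absurd h (by simp [PySem.Set.empty])
            · exact h
          · exact Or.inr
        apply ih
        · intro x
          rw [hexp, hv']
          constructor
          · rintro (h | ⟨n, hn, hxn⟩)
            · exact Or.inl h
            · by_cases hnff : n ∈ f
              · exact Or.inr ⟨n, hnff, hxn⟩
              · exact Or.inl (hcl n x hn hnff hxn)
          · rintro (h | ⟨n, hn, hxn⟩)
            · exact Or.inl h
            · exact Or.inr ⟨n, hf n hn, hxn⟩
        · intro x hx
          rw [hnf'] at hx
          rw [hv']
          exact Or.inr hx.1
        · intro x y hx hxnf hy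
          rw [hv'] at hx ⊢
          rcases hx with hx | ⟨n, hn, hxn⟩
          · by_cases hxf : x ∈ f
            · exact Or.inr ⟨x, hxf, hy⟩
            · exact Or.inl (hcl x y hx hxf hy)
          · by_cases hxv : x ∈ v
            · by_cases hxf : x ∈ f
              · exact Or.inr ⟨x, hxf, hy⟩
              · exact Or.inl (hcl x y hxv hxf hy)
            · exact absurd ((hnf' x).mpr ⟨⟨n, hn, hxn⟩, hxv⟩) hxnf
        · rw [hv']
          rintro (h | h)
          · exact hb h
          · exact hnex h

-- ===== VERDICT (by name: the statement is the Claim_ definition above) =====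
theorem are_connected_py_spec : Claim_equal_are_connected_py := by
  intro a b adj m _
  unfold Spec_are_connected_py are_connected_py are_connected_py_alt
  by_cases hab : a = b
  · simp [hab]
  · have h1 : (a == b) = false := by simp [hab]
    simp only [h1, Bool.false_eq_true, if_false]
    apply rounds_eq
    · intro x; rfl
    · intro x hx; exact hx
    · intro x y hx hxf _
      exact absurd hx hxf
    · intro hbmem
      rw [PySem.Set.mem_ofList] at hbmem
      simp at hbmem
      exact hab hbmem.symm
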